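-- pv_equiv track=rewrite | github.com/fabeschan/cs224n-squad | code/qa_answer.py | get_minibatches
-- ===== SOURCE A (Python) =====
-- def get_minibatches(data, batch_size=-1):
--     batch = []
--     indices = range(len(data))
--     for i in indices:
--         batch.append(data[i])
--         if len(batch) == batch_size:
--             yield batch
--             batch = []
--     if len(batch):
--         yield batch
-- ===== SOURCE B (Python) =====
-- def get_minibatches(data, batch_size=-1):
--     n = len(data)
--     if batch_size <= 0:
--         # no positive batch size: everything is one batch (yielded only if non-empty)
--         if n:
--             yield list(data)
--         return
--     for i in range(0, n, batch_size):
--         yield list(data[i:i+batch_size])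
-- ===== Notes on version B (the rewrite author's own statement) =====
-- stated objective: idiomatic
-- what changed: Replaces the element-by-element accumulator (append, flush when full, flush leftovers) with slice-based chunking: yield list(data[i:i+batch_size]) for i in range(0, n, batch_size), with the non-positive batch_size case handled up front as one whole batch.
import Mathlib
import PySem

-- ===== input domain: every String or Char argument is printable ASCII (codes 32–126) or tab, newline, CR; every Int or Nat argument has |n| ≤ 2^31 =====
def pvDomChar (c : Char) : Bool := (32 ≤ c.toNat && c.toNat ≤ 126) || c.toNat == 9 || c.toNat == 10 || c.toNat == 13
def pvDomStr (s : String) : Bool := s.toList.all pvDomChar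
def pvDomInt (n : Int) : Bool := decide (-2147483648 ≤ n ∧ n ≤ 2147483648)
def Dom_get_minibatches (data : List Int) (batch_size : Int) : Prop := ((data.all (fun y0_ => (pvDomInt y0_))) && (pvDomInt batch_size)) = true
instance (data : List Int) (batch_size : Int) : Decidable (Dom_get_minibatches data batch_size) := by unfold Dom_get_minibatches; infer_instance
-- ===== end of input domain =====

-- B chunks by slices (range with step + data[i:i+batch_size]) instead of A's append/flush accumulator;
-- the generators are compared by the list of yielded batches. Objective: idiomatic.

-- ===== PORT A =====
def get_minibatches (data : List Int) (batch_size : Int) : List (List Int) :=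
  -- batch = []; for i in range(len(data)): batch.append(data[i]); if len(batch)==batch_size: yield batch; batch=[]
  -- i always indexes in range, so data[i] is pyGetD with an unused default
  let r := (PySem.List.pyRange 0 (PySem.List.len data)).foldl
    (fun (st : List Int × List (List Int)) i =>
      let batch := st.1 ++ [PySem.List.pyGetD data i 0]
      if (batch.length : Int) = batch_size then ([], st.2 ++ [batch])
      else (batch, st.2)) ([], [])
  -- if len(batch): yield batch
  if r.1.length ≠ 0 then r.2 ++ [r.1] else r.2

-- ===== PORT B =====
def get_minibatches_alt (data : List Int) (batch_size : Int) : List (List Int) :=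
  let n : Int := PySem.List.len data
  if batch_size ≤ 0 then
    if n ≠ 0 then [data] else []
  else
    (PySem.List.pyRange 0 n batch_size).map
      (fun i => PySem.List.slice data (some i) (some (i + batch_size)))

-- ===== PRECONDITION & SPEC =====
def Spec_get_minibatches (data : List Int) (batch_size : Int) (out : List (List Int)) : Prop := out = get_minibatches_alt data batch_size
instance (data : List Int) (batch_size : Int) (out : List (List Int)) : Decidable (Spec_get_minibatches data batch_size out) := by unfold Spec_get_minibatches; infer_instance

-- ===== CLAIM (what is proved, stated in full; the proofs are below) =====
def Claim_equal_get_minibatches : Prop := ∀ (data : List Int) (batch_size : Int), Dom_get_minibatches data batch_size → Spec_get_minibatches data batch_size (get_minibatches data batch_size)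

-- ===== LEMMAS AND PROOFS =====

-- canonical chunker: successive chunks of size c+1, last one possibly shorter
def chunkS (c : Nat) : List Int → List (List Int)
  | [] => []
  | x :: xs => (x :: xs.take c) :: chunkS c (xs.drop c)
  termination_by xs => xs.length
  decreasing_by simp

lemma chunkS_nil (c : Nat) : chunkS c [] = [] := by rw [chunkS]

lemma chunkS_cons (c : Nat) (x : Int) (xs : List Int) :
    chunkS c (x :: xs) = (x :: xs.take c) :: chunkS c (xs.drop c) := by rw [chunkS]

lemma chunkS_ne_nil (c : Nat) (l : List Int) (h : l ≠ []) :
    chunkS c l = l.take (c + 1) :: chunkS c (l.drop (c + 1)) := by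
  cases l with
  | nil => exact absurd rfl h
  | cons z zs => simp [chunkS_cons]

-- A's loop body as a plain fold over the data
def aStep (b : Int) (st : List Int × List (List Int)) (x : Int) : List Int × List (List Int) :=
  let batch := st.1 ++ [x]
  if (batch.length : Int) = b then ([], st.2 ++ [batch]) else (batch, st.2)

lemma get_minibatches_eq_fold (data : List Int) (b : Int) :
    get_minibatches data b =
      (let r := data.foldl (aStep b) ([], []);
       if r.1.length ≠ 0 then r.2 ++ [r.1] else r.2) := by
  unfold get_minibatches
  exact congrArg (fun r : List Int × List (List Int) => if r.1.length ≠ 0 then r.2 ++ [r.1] else r.2)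
    (PySem.List.foldl_pyRange_zero_pyGetD data 0 (aStep b) ([], []))

lemma fold_nonpos (b : Int) (hb : b ≤ 0) (xs : List Int) (out : List (List Int)) :
    ∀ batch : List Int, xs.foldl (aStep b) (batch, out) = (batch ++ xs, out) := by
  induction xs with
  | nil => intro batch; simp
  | cons x xs ih =>
      intro batch
      have hne : ¬ ((batch.length : Int) + 1 = b) := by omega
      simp [List.foldl_cons, aStep, hne, ih (batch ++ [x])]

lemma fold_flush (c : Nat) (xs : List Int) :
    ∀ (batch : List Int) (out : List (List Int)), batch.length < c + 1 →
    (let r := xs.foldl (aStep ((c : Int) + 1)) (batch, out);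
     if r.1.length ≠ 0 then r.2 ++ [r.1] else r.2) = out ++ chunkS c (batch ++ xs) := by
  induction xs with
  | nil =>
      intro batch out hlt
      cases batch with
      | nil => simp [chunkS_nil]
      | cons y ys =>
          simp only [List.length_cons] at hlt
          simp [chunkS_cons, List.take_of_length_le (by omega : ys.length ≤ c),
                List.drop_of_length_le (by omega : ys.length ≤ c), chunkS_nil]
  | cons x xs ih =>
      intro batch out hlt
      by_cases h : batch.length + 1 = c + 1
      · have hcond : ((batch.length : Int) + 1 = (c : Int) + 1) := by omega
        have hlen : (batch ++ [x]).length = c + 1 := by simp; omega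
        simp only [List.foldl_cons, aStep, List.length_append, List.length_cons,
          List.length_nil, Nat.zero_add, Nat.cast_add, Nat.cast_one, hcond, if_true]
        rw [ih [] (out ++ [batch ++ [x]]) (by simp)]
        rw [show batch ++ x :: xs = (batch ++ [x]) ++ xs by simp]
        rw [chunkS_ne_nil c ((batch ++ [x]) ++ xs) (by simp)]
        rw [List.take_left' hlen, List.drop_left' hlen]
        simp
      · have hcond : ¬ ((batch.length : Int) + 1 = (c : Int) + 1) := by omega
        have := ih (batch ++ [x]) out (by simp; omega)
        simp only [List.foldl_cons, aStep, List.length_append, List.length_cons,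
          List.length_nil, Nat.zero_add, Nat.cast_add, Nat.cast_one, hcond,
          if_false] at this ⊢
        simpa using this

lemma chunkS_eq_map_range (c : Nat) (xs : List Int) :
    (List.range ((xs.length + c) / (c + 1))).map
      (fun k => (xs.drop ((c + 1) * k)).take (c + 1)) = chunkS c xs := by
  induction xs using chunkS.induct c with
  | case1 =>
      have h0 : ([] : List Int).length + c < c + 1 := by simp
      rw [Nat.div_eq_of_lt h0]
      simp [chunkS_nil]
  | case2 x xs ih =>
      have h1 : ((x :: xs).length + c) / (c + 1) = xs.length / (c + 1) + 1 := by
        simp only [List.length_cons]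
        rw [show xs.length + 1 + c = xs.length + (c + 1) by omega,
          Nat.add_div_right _ (Nat.succ_pos c)]
      have h2 : ((xs.drop c).length + c) / (c + 1) = xs.length / (c + 1) := by
        simp only [List.length_drop]
        by_cases hc : c ≤ xs.length
        · rw [show xs.length - c + c = xs.length by omega]
        · rw [show xs.length - c + c = c by omega,
            Nat.div_eq_of_lt (by omega), Nat.div_eq_of_lt (by omega)]
      rw [h1, List.range_succ_eq_map, List.map_cons, List.map_map, chunkS_cons]
      congr 1
      rw [← ih, ← h2]
      apply List.map_congr_left
      intro k _
      show ((x :: xs).drop ((c + 1) * (Nat.succ k))).take (c + 1)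
          = ((xs.drop c).drop ((c + 1) * k)).take (c + 1)
      congr 1
      rw [show (c + 1) * (Nat.succ k) = ((c + 1) * k + c) + 1 by rw [Nat.succ_eq_add_one]; ring,
        List.drop_succ_cons, List.drop_drop]
      congr 1
      omega

lemma alt_pos (c : Nat) (data : List Int) :
    get_minibatches_alt data ((c : Int) + 1) = chunkS c data := by
  unfold get_minibatches_alt
  rw [if_neg (by omega : ¬ ((c : Int) + 1 ≤ 0))]
  rw [PySem.List.pyRange_of_pos _ _ (by omega : (0:Int) < (c : Int) + 1)]
  rw [List.map_map]
  cases data with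
  | nil => simp [chunkS_nil, PySem.List.len]
  | cons x xs =>
      have hlen : PySem.List.len (x :: xs) = ((x :: xs).length : Int) := by
        simp [PySem.List.len]
      rw [hlen, if_pos (show (0:Int) < ((x :: xs).length : Int) by exact_mod_cast Nat.succ_pos xs.length)]
      have hcount : (((((x :: xs).length : Int)) - 0 + ((c : Int) + 1) - 1) / ((c : Int) + 1)).toNat
          = ((x :: xs).length + c) / (c + 1) := by
        have : (((x :: xs).length : Int)) - 0 + ((c : Int) + 1) - 1 = (((x :: xs).length + c : Nat) : Int) := by
          push_cast; ring
        rw [this, show ((c : Int) + 1) = (((c + 1 : Nat)) : Int) by push_cast; ring,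
          ← Int.natCast_div, Int.toNat_natCast]
      rw [hcount, ← chunkS_eq_map_range c (x :: xs)]
      apply List.map_congr_left
      intro k _
      simp only [Function.comp]
      have h0 : (0 : Int) + ((c : Int) + 1) * (k : Int) = (((c + 1) * k : Nat) : Int) := by
        push_cast; ring
      have h1 : (((c + 1) * k : Nat) : Int) + ((c : Int) + 1) = (((c + 1) * k : Nat) : Int) + ((c + 1 : Nat) : Int) := by
        push_cast; ring
      rw [h0, h1, PySem.List.slice_natCast_add]

-- ===== VERDICT (by name: the statement is the Claim_ definition above) =====
theorem get_minibatches_spec : Claim_equal_get_minibatches := by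
  intro data b _
  unfold Spec_get_minibatches
  by_cases hb : b ≤ 0
  · rw [get_minibatches_eq_fold, fold_nonpos b hb data [] []]
    unfold get_minibatches_alt
    rw [if_pos hb]
    cases data <;> simp [PySem.List.len]
    omega
  · obtain ⟨c, hc⟩ : ∃ c : Nat, b = (c : Int) + 1 := ⟨(b - 1).toNat, by omega⟩
    subst hc
    rw [get_minibatches_eq_fold, fold_flush c data [] [] (by simp)]
    rw [alt_pos]
    simp
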